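-- pv_equiv track=rewrite | github.com/engineerA314/async-grpo-nccl | vllm_worker.py | get_indices_of_delimiter
-- ===== SOURCE A (Python) =====
-- def get_indices_of_delimiter(response, delimiter):
--     indices = []
--     start = 0
--     while True:
--         index = response.find(delimiter, start)
--         if index == -1:
--             break
--         indices.append(index)
--         start = index + len(delimiter)
--     return indices
-- ===== SOURCE B (Python) =====
-- def get_indices_of_delimiter(response, delimiter):
--     indices = []
--     i = 0
--     n = len(delimiter)
--     while i < len(response):
--         if response[i:i + n] == delimiter:
--             indices.append(i)
--             i += n
--         else:
--             i += 1
--     return indices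
-- ===== Notes on version B (the rewrite author's own statement) =====
-- stated objective: alternative
-- what changed: Replaced the repeated str.find jump-to-next-match loop with a single positional scan that walks the string one index at a time, comparing a fixed-length slice at each position and skipping the delimiter's length on a match.
import Mathlib
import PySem

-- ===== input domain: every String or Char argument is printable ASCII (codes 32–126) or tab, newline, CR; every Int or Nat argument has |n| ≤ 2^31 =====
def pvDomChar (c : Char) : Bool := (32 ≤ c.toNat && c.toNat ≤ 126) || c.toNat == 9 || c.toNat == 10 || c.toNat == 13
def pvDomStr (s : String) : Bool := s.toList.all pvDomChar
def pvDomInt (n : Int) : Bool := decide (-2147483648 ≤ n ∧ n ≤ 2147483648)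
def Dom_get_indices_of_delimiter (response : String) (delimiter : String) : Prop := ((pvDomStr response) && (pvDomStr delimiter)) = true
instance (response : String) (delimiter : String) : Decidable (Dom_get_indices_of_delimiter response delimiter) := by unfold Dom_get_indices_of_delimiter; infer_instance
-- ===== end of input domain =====

-- B walks the string one index at a time comparing a fixed slice, instead of A's repeated find-and-jump; same values on every nonempty delimiter.

-- ===== PORT A =====
-- hand port of Python's str.find(delimiter, start) for start ≥ 0: first i ≥ start (i ≤ len) where
-- the slice of length |d| at i equals d, else -1; exact on that domain (empty d matches anywhere).
def pvFindFrom (s d : List Char) (start : Nat) : Int :=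
  if h : start ≤ s.length then
    if (s.drop start).take d.length = d then (start : Int)
    else pvFindFrom s d (start + 1)
  else -1
termination_by s.length + 1 - start
decreasing_by omega

-- A's while-True loop; fuel |s|+1 is enough for every terminating run (start strictly increases
-- while staying ≤ |s| when the delimiter is nonempty); Pre_ excludes the empty delimiter, on which
-- the Python loops forever.
def pvLoopA (s d : List Char) : Nat → Nat → List Int
  | _, 0 => []
  | start, fuel + 1 =>
    let index := pvFindFrom s d start
    if index = -1 then []
    else index :: pvLoopA s d (index.toNat + d.length) fuel

def get_indices_of_delimiter (response : String) (delimiter : String) : List Int :=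
  pvLoopA response.toList delimiter.toList 0 (response.toList.length + 1)

-- ===== PORT B =====
-- B's positional scan; fuel |s|+1 is enough (i strictly increases each step for nonempty delimiter).
def pvScanB (s d : List Char) : Nat → Nat → List Int
  | _, 0 => []
  | i, fuel + 1 =>
    if i < s.length then
      if (s.drop i).take d.length = d then (i : Int) :: pvScanB s d (i + d.length) fuel
      else pvScanB s d (i + 1) fuel
    else []

def get_indices_of_delimiter_alt (response : String) (delimiter : String) : List Int :=
  pvScanB response.toList delimiter.toList 0 (response.toList.length + 1)

-- ===== PRECONDITION & SPEC =====
-- Pre_ excludes only the empty delimiter: there Python A loops forever (find('', start) returns start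
-- and start never advances), so A returns no value; Python B also loops forever there.
def Pre_get_indices_of_delimiter (response : String) (delimiter : String) : Prop := delimiter ≠ ""
instance (response : String) (delimiter : String) : Decidable (Pre_get_indices_of_delimiter response delimiter) := by unfold Pre_get_indices_of_delimiter; infer_instance

def pvWitness_get_indices_of_delimiter : String × String := ("ab,cd,ef", ",")

def Spec_get_indices_of_delimiter (response : String) (delimiter : String) (out : List Int) : Prop := out = get_indices_of_delimiter_alt response delimiter
instance (response : String) (delimiter : String) (out : List Int) : Decidable (Spec_get_indices_of_delimiter response delimiter out) := by unfold Spec_get_indices_of_delimiter; infer_instance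

-- ===== CLAIM (what is proved, stated in full; the proofs are below) =====
def Claim_equal_get_indices_of_delimiter : Prop := ∀ (response : String) (delimiter : String), Dom_get_indices_of_delimiter response delimiter → Pre_get_indices_of_delimiter response delimiter → Spec_get_indices_of_delimiter response delimiter (get_indices_of_delimiter response delimiter)

-- ===== LEMMAS AND PROOFS =====

lemma pvFindFrom_ge (s d : List Char) (hd : d ≠ []) (i : Nat) (h : s.length ≤ i) :
    pvFindFrom s d i = -1 := by
  rw [pvFindFrom]
  by_cases h1 : i ≤ s.length
  · have hi : i = s.length := Nat.le_antisymm h1 h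
    have hm : ¬ ((s.drop i).take d.length = d) := by
      subst hi; simp only [List.drop_length, List.take_nil]
      exact fun hc => hd hc.symm
    rw [pvFindFrom]
    simp [h1, hm]
    omega
  · simp [h1]

lemma pvFindFrom_match (s d : List Char) (i : Nat) (h : i ≤ s.length)
    (hm : (s.drop i).take d.length = d) : pvFindFrom s d i = (i : Int) := by
  rw [pvFindFrom]; simp [h, hm]

lemma pvFindFrom_nomatch (s d : List Char) (i : Nat) (h : i ≤ s.length)
    (hm : ¬ (s.drop i).take d.length = d) : pvFindFrom s d i = pvFindFrom s d (i + 1) := by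
  rw [pvFindFrom]; simp [h, hm]

lemma pvLoop_eq_scan (s d : List Char) (hd : d ≠ []) :
    ∀ k i fa fb, s.length - i < k → s.length + 1 - i ≤ fa → s.length + 1 - i ≤ fb →
      pvLoopA s d i fa = pvScanB s d i fb := by
  intro k
  induction k with
  | zero => intro i fa fb h; omega
  | succ k ih =>
    intro i fa fb hk hfa hfb
    by_cases hi : i < s.length
    · have hdl : 1 ≤ d.length := List.length_pos_iff.mpr hd
      obtain ⟨fa', rfl⟩ : ∃ fa', fa = fa' + 1 := ⟨fa - 1, by omega⟩
      obtain ⟨fb', rfl⟩ : ∃ fb', fb = fb' + 1 := ⟨fb - 1, by omega⟩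
      by_cases hm : (s.drop i).take d.length = d
      · have hf := pvFindFrom_match s d i (Nat.le_of_lt hi) hm
        rw [pvLoopA, pvScanB]
        simp only [hf, hi, hm, if_pos]
        have : ¬ ((i : Int) = -1) := by omega
        simp only [this, if_neg, Int.toNat_natCast , not_false_iff]
        refine congrArg (List.cons _) ?_
        exact ih (i + d.length) fa' fb' (by omega) (by omega) (by omega)
      · have hf := pvFindFrom_nomatch s d i (Nat.le_of_lt hi) hm
        rw [pvLoopA, pvScanB]
        simp only [hf, hi, hm, if_pos, if_neg, not_false_iff]
        have step : pvLoopA s d (i + 1) (fa' + 1) =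
            (let index := pvFindFrom s d (i + 1);
             if index = -1 then [] else index :: pvLoopA s d (index.toNat + d.length) fa') := by
          rw [pvLoopA]
        rw [← step]
        exact ih (i + 1) (fa' + 1) fb' (by omega) (by omega) (by omega)
    · have h1 : pvScanB s d i fb = [] := by
        cases fb with
        | zero => rfl
        | succ fb' => rw [pvScanB]; simp [hi]
      have h2 : pvLoopA s d i fa = [] := by
        cases fa with
        | zero => rfl
        | succ fa' =>
          rw [pvLoopA]
          simp [pvFindFrom_ge s d hd i (by omega)]
      rw [h1, h2]

lemma toList_ne_nil_of_ne_empty (s : String) (h : s ≠ "") : s.toList ≠ [] := by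
  simpa [String.toList_eq_nil_iff] using h

-- ===== VERDICT (by name: the statement is the Claim_ definition above) =====
theorem get_indices_of_delimiter_spec : Claim_equal_get_indices_of_delimiter := by
  intro response delimiter _ hpre
  unfold Spec_get_indices_of_delimiter get_indices_of_delimiter get_indices_of_delimiter_alt
  exact pvLoop_eq_scan response.toList delimiter.toList
    (toList_ne_nil_of_ne_empty delimiter hpre)
    (response.toList.length + 1) 0 _ _ (by omega) (by omega) (by omega)
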